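-- pv_equiv track=rewrite | github.com/cir1711/MOresolver | src/Q7.py | pregunta_1
-- ===== SOURCE A (Python) =====
-- def mcd(n):
--   l = []
--   for divisor in range(1,n+1):
--     if (n % divisor) == 0:
--       l.append(divisor)
--   return l
--
-- def pregunta_1(e,n):
--   if e % 2 == 0:
--     return "NO"
--   l, l2 = mcd(e), mcd(n)
--   for i in l2:
--     if i != 1 and i in l:
--         return "NO"
--   return "SI"
-- ===== SOURCE B (Python) =====
-- def pregunta_1(e, n):
--     if e % 2 == 0:
--         return "NO"
--     for d in range(2, min(e, n) + 1):
--         if e % d == 0 and n % d == 0: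
--             return "NO"
--     return "SI"
-- ===== Notes on version B (the rewrite author's own statement) =====
-- stated objective: faster
-- what changed: Instead of materialising the full divisor lists of e and n and doing a nested membership scan, B runs a single loop over 2..min(e,n) and returns 'NO' at the first common divisor; no lists are built.
import Mathlib
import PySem

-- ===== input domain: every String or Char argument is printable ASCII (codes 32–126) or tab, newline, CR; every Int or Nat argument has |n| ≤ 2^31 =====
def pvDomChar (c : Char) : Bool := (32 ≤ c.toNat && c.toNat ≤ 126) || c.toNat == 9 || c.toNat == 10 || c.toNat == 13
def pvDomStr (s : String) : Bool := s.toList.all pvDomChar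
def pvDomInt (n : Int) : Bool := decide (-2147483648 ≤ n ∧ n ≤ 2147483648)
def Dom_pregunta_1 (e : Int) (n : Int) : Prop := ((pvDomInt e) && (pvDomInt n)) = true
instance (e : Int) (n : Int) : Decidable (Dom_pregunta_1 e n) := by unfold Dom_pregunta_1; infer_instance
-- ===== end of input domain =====

-- B replaces A's two materialised divisor lists and nested membership scan by a
-- single early-exit loop over 2..min(e,n) looking for a common divisor.

-- ===== PORT A =====
def mcd (n : Int) : List Int :=
  (PySem.List.pyRange 1 (n + 1) 1).foldl
    (fun l divisor => if PySem.Int.mod n divisor == 0 then l ++ [divisor] else l) []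

def pregunta_1 (e : Int) (n : Int) : String :=
  if PySem.Int.mod e 2 == 0 then "NO"
  else
    let l := mcd e
    let l2 := mcd n
    if l2.any (fun i => i != 1 && l.contains i) then "NO" else "SI"

-- ===== PORT B =====
def pregunta_1_alt (e : Int) (n : Int) : String :=
  if PySem.Int.mod e 2 == 0 then "NO"
  else if (PySem.List.pyRange 2 (min e n + 1) 1).any
      (fun d => PySem.Int.mod e d == 0 && PySem.Int.mod n d == 0) then "NO"
  else "SI"

-- ===== PRECONDITION & SPEC =====
def Spec_pregunta_1 (e : Int) (n : Int) (out : String) : Prop := out = pregunta_1_alt e n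
instance (e : Int) (n : Int) (out : String) : Decidable (Spec_pregunta_1 e n out) := by unfold Spec_pregunta_1; infer_instance

-- ===== CLAIM (what is proved, stated in full; the proofs are below) =====
def Claim_equal_pregunta_1 : Prop := ∀ (e : Int) (n : Int), Dom_pregunta_1 e n → Spec_pregunta_1 e n (pregunta_1 e n)

-- ===== LEMMAS AND PROOFS =====

theorem mem_mcd (n i : Int) :
    i ∈ mcd n ↔ (1 ≤ i ∧ i < n + 1) ∧ PySem.Int.mod n i = 0 := by
  unfold mcd
  rw [PySem.List.foldl_append_if_eq_filter]
  simp [List.mem_filter, PySem.List.mem_pyRange_one, and_assoc]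

theorem any_eq (e n : Int) :
    ((mcd n).any (fun i => i != 1 && (mcd e).contains i)
      = (PySem.List.pyRange 2 (min e n + 1) 1).any
          (fun d => PySem.Int.mod e d == 0 && PySem.Int.mod n d == 0)) := by
  rw [Bool.eq_iff_iff, List.any_eq_true, List.any_eq_true]
  constructor
  · rintro ⟨i, hi, hcond⟩
    simp only [Bool.and_eq_true, bne_iff_ne, ne_eq, List.contains_iff_mem] at hcond
    obtain ⟨hne, hmem⟩ := hcond
    rw [mem_mcd] at hi hmem
    refine ⟨i, ?_, ?_⟩
    · rw [PySem.List.mem_pyRange_one]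
      omega
    · simp [hmem.2, hi.2]
  · rintro ⟨d, hd, hcond⟩
    rw [PySem.List.mem_pyRange_one] at hd
    simp only [Bool.and_eq_true, beq_iff_eq] at hcond
    refine ⟨d, ?_, ?_⟩
    · rw [mem_mcd]; exact ⟨⟨by omega, by omega⟩, hcond.2⟩
    · simp only [Bool.and_eq_true, bne_iff_ne, ne_eq, List.contains_iff_mem]
      refine ⟨by omega, ?_⟩
      rw [mem_mcd]; exact ⟨⟨by omega, by omega⟩, hcond.1⟩

-- ===== VERDICT (by name: the statement is the Claim_ definition above) =====
theorem pregunta_1_spec : Claim_equal_pregunta_1 := by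
  intro e n _
  unfold Spec_pregunta_1 pregunta_1 pregunta_1_alt
  by_cases h : (PySem.Int.mod e 2 == 0) = true
  · rw [if_pos h, if_pos h]
  · rw [if_neg h, if_neg h]
    show (if ((mcd n).any fun i => i != 1 && (mcd e).contains i) = true then "NO" else "SI") = _
    rw [any_eq e n]
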